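-- pv_equiv track=rewrite | github.com/SaYaNa1234567/PythonWithAymen | index.py | wsp
-- ===== SOURCE A (Python) =====
-- def wsp(text):
--
--   words = text.split()
--   res = ""
--   for x in words:
--     f1 = x[0].upper()
--     rest = x[1:].lower()
--     res += f1+rest
--   return res
-- ===== SOURCE B (Python) =====
-- def wsp(text):
--   res = []
--   new_word = True
--   for ch in text:
--     if ch.isspace():
--       new_word = True
--     else:
--       res.append(ch.upper() if new_word else ch.lower())
--       new_word = False
--   return "".join(res)
-- ===== Notes on version B (the rewrite author's own statement) =====
-- stated objective: alternative
-- what changed: Replaces split()-then-per-word slicing/concatenation with a single character-level pass that tracks a new_word flag and collects cased characters into a list joined once.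
import Mathlib
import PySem

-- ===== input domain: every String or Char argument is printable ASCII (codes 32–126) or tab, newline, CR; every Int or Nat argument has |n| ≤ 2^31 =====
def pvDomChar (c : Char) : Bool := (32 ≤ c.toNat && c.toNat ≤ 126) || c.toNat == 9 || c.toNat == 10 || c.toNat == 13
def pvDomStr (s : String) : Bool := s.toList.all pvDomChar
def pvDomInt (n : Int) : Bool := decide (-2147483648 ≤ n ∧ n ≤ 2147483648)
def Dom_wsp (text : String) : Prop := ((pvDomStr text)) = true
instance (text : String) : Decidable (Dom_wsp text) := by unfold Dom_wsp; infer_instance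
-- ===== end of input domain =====

-- B replaces split()-plus-per-word slicing with one character pass keeping a new_word flag; alternative decomposition, return value only.

-- ===== PORT A =====
def wsp (text : String) : String :=
  let words := PySem.Chars.split₀ text.toList
  String.mk (words.foldl (fun res x =>
    match PySem.List.pyGet? x 0 with
    | some c =>
        res ++ PySem.Chars.upper [c] ++ PySem.Chars.lower (PySem.List.slice x (some 1) none)
    | none => res   -- unreachable: split() yields nonempty words (Python would raise IndexError)
    ) [])

-- ===== PORT B =====
def wsp_alt (text : String) : String :=
  String.mk ((text.toList.foldl (fun (st : List Char × Bool) ch =>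
    if PySem.Chars.isspace ch then (st.1, true)
    else (st.1 ++ (if st.2 then PySem.Chars.upper [ch] else PySem.Chars.lower [ch]), false))
    ([], true)).1)

-- ===== PRECONDITION & SPEC =====
def Spec_wsp (text : String) (out : String) : Prop := out = wsp_alt text
instance (text : String) (out : String) : Decidable (Spec_wsp text out) := by unfold Spec_wsp; infer_instance

-- ===== CLAIM (what is proved, stated in full; the proofs are below) =====
def Claim_equal_wsp : Prop := ∀ (text : String), Dom_wsp text → Spec_wsp text (wsp text)

-- ===== LEMMAS AND PROOFS =====

-- what A contributes for one word
def hW : List Char → List Char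
  | [] => []
  | c :: t => PySem.Chars.upperChar c :: t.map PySem.Chars.lowerChar

-- what B's pass produces from a character list given the new_word flag
def proc : List Char → Bool → List Char
  | [], _ => []
  | c :: cs, b =>
      if PySem.Chars.isspace c then proc cs true
      else (if b then PySem.Chars.upperChar c else PySem.Chars.lowerChar c) :: proc cs false

theorem hW_eq_step (x : List Char) :
    (match PySem.List.pyGet? x 0 with
      | some c => PySem.Chars.upper [c] ++ PySem.Chars.lower (PySem.List.slice x (some 1) none)
      | none => ([] : List Char)) = hW x := by
  cases x with
  | nil => simp [PySem.List.pyGet?, PySem.List.pyIdx?, hW]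
  | cons c t =>
      have h1 : PySem.List.slice (c :: t) (some 1) none = t := by
        rw [PySem.List.slice_from (c :: t) (by norm_num : (0:Int) ≤ 1)]; rfl
      simp [PySem.List.pyGet?, PySem.List.pyIdx?, hW, h1, PySem.Chars.upper, PySem.Chars.lower]

theorem hW_snoc2 (l : List Char) (d c : Char) :
    hW (l ++ [d, c]) = hW (l ++ [d]) ++ [PySem.Chars.lowerChar c] := by
  cases l <;> simp [hW]

theorem go_spec (cs : List Char) : ∀ (cur : List Char) (acc : List (List Char)),
    (PySem.Chars.split₀.go cs cur acc).flatMap hW =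
      acc.reverse.flatMap hW ++ hW cur.reverse ++ proc cs cur.isEmpty := by
  induction cs with
  | nil =>
      intro cur acc
      cases cur with
      | nil => simp [PySem.Chars.split₀.go, hW, proc]
      | cons d t => simp [PySem.Chars.split₀.go, proc]
  | cons c rest ih =>
      intro cur acc
      by_cases hs : PySem.Chars.isspace c
      · cases cur with
        | nil => simp [PySem.Chars.split₀.go, hs, ih, hW, proc]
        | cons d t => simp [PySem.Chars.split₀.go, hs, ih, proc, hW]
      · cases cur with
        | nil => simp [PySem.Chars.split₀.go, hs, ih, hW, proc]
        | cons d t => simp [PySem.Chars.split₀.go, hs, ih, proc, hW_snoc2]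

theorem b_fold (cs : List Char) : ∀ (res : List Char) (b : Bool),
    (cs.foldl (fun (st : List Char × Bool) ch =>
      if PySem.Chars.isspace ch then (st.1, true)
      else (st.1 ++ (if st.2 then PySem.Chars.upper [ch] else PySem.Chars.lower [ch]), false))
      (res, b)).1 = res ++ proc cs b := by
  induction cs with
  | nil => simp [proc]
  | cons c t ih =>
      intro res b
      rw [List.foldl_cons]
      by_cases hs : PySem.Chars.isspace c
      · simp only [hs, ite_true, ih, proc]
      · cases b
        · simp only [hs, ite_false, Bool.false_eq_true, ih, proc]
          simp [PySem.Chars.lower]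
        · simp only [hs, ite_false, ite_true, Bool.false_eq_true, ih, proc]
          simp [PySem.Chars.upper]

-- ===== VERDICT (by name: the statement is the Claim_ definition above) =====
theorem wsp_spec : Claim_equal_wsp := by
  intro text _
  unfold Spec_wsp wsp wsp_alt
  apply congrArg String.mk
  have hfun : (fun (res : List Char) (x : List Char) =>
      match PySem.List.pyGet? x 0 with
      | some c =>
          res ++ PySem.Chars.upper [c] ++ PySem.Chars.lower (PySem.List.slice x (some 1) none)
      | none => res) = fun res x => res ++ hW x := by
    funext res x
    rw [← hW_eq_step]
    cases PySem.List.pyGet? x 0 <;> simp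
  rw [hfun, PySem.List.foldl_append_eq_flatMap, b_fold]
  show List.flatMap hW (PySem.Chars.split₀.go text.toList [] []) = _
  rw [go_spec]
  simp [hW]
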